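-- pv_equiv track=rewrite | github.com/dshutrin/24-master | shop/admin_panel_views.py | get_ages_from_age
-- ===== SOURCE A (Python) =====
-- def get_ages_from_age(age):
--     age_start = None
--     age_end = None
--     if age:
--         integers = []
--         n = 0
--         while n < len(age):
--             s_int = ''
--             while n < len(age) and '0' <= age[n] <= '9':
--                 s_int += age[n]
--                 n += 1
--             n += 1
--             if s_int != '':
--                 integers.append(int(s_int))
--         age_start = min(integers)
--         if len(integers) > 1:
--             age_end = max(integers)
--
--     return age_start, age_end
-- ===== SOURCE B (Python) =====
-- def get_ages_from_age(age):
--     if not age: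
--         return None, None
--     cleaned = ''.join(c if '0' <= c <= '9' else ' ' for c in age)
--     ints = [int(t) for t in cleaned.split()]
--     if not ints:
--         return None, None
--     return min(ints), (max(ints) if len(ints) > 1 else None)
-- ===== Notes on version B (the rewrite author's own statement) =====
-- stated objective: simpler
-- what changed: A's hand-rolled two-level while tokenizer with manual index arithmetic is replaced by one cleaning pass that maps every non-digit to a space followed by a whitespace split(), then min/max of the parsed tokens.
-- outside the precondition, e.g. on get_ages_from_age('adult'): A raises ValueError, B returns (None, None)
-- crash fix: On nonempty strings containing no ASCII digit, A raises ValueError (min() of an empty list); B returns (None, None). — e.g. on get_ages_from_age(some "adult"): A raises ValueError, B returns (none, none)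
import Mathlib
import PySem

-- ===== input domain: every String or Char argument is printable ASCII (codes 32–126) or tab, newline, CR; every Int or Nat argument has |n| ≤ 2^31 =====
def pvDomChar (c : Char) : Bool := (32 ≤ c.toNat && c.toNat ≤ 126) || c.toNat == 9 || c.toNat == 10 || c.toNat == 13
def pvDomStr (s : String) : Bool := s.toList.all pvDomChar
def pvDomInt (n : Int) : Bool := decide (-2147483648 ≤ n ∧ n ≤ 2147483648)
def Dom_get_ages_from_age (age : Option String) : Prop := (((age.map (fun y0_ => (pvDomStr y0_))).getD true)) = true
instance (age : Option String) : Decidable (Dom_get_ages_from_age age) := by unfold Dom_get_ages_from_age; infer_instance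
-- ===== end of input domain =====

-- B replaces A's hand-rolled two-level index tokenizer with one cleaning pass (non-digits → ' ')
-- followed by a whitespace split; objective: simpler. Equivalence is about the return value.

-- ===== PORT A =====

-- '0' <= age[n] <= '9'
def pvIsDig (c : Char) : Bool := '0' ≤ c && c ≤ '9'

-- the inner while: returns (s_int, the remaining suffix starting at the char that stopped the scan)
def pvAInner : List Char → List Char × List Char
  | [] => ([], [])
  | c :: cs =>
    if pvIsDig c then (c :: (pvAInner cs).1, (pvAInner cs).2)
    else ([], c :: cs)

lemma pvAInner_snd_le (cs : List Char) : (pvAInner cs).2.length ≤ cs.length := by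
  induction cs with
  | nil => simp [pvAInner]
  | cons c cs ih =>
    simp only [pvAInner]
    split
    · exact Nat.le_succ_of_le ih
    · simp

lemma pvAInner_rest_lt (c : Char) (cs : List Char) :
    ((pvAInner (c :: cs)).2.drop 1).length < (c :: cs).length := by
  simp only [pvAInner]
  split
  · have h := pvAInner_snd_le cs
    simp only [List.length_drop, List.length_cons]
    omega
  · simp

-- the outer while over the remaining suffix; `n += 1` after the inner loop is the `drop 1`
def pvAOuter : List Char → List Int
  | [] => []
  | c :: cs =>
    if (pvAInner (c :: cs)).1 = [] then pvAOuter ((pvAInner (c :: cs)).2.drop 1)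
    else (PySem.Int.ofChars? (pvAInner (c :: cs)).1).getD 0 :: pvAOuter ((pvAInner (c :: cs)).2.drop 1)
      -- int(s_int): s_int is a nonempty digit run, so int() always returns (the getD default is never taken)
  termination_by cs => cs.length
  decreasing_by all_goals exact pvAInner_rest_lt c cs

def get_ages_from_age (age : Option String) : Option Int × Option Int :=
  match age with
  | none => (none, none)
  | some s =>
    if s.toList.isEmpty then (none, none)   -- `if age:` — empty string is falsy
    else
      let integers := pvAOuter s.toList
      -- min(integers) raises ValueError when integers = []; Pre_ excludes exactly those inputs
      (PySem.List.min? integers (fun x => x),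
       if integers.length > 1 then PySem.List.max? integers (fun x => x) else none)

-- ===== PORT B =====
def get_ages_from_age_alt (age : Option String) : Option Int × Option Int :=
  match age with
  | none => (none, none)
  | some s =>
    if s.toList.isEmpty then (none, none)
    else
      let cleaned := s.toList.map (fun c => if pvIsDig c then c else ' ')
      let ints := (PySem.Chars.split₀ cleaned).map (fun t => (PySem.Int.ofChars? t).getD 0)
      if ints = [] then (none, none)
      else (PySem.List.min? ints (fun x => x),
            if ints.length > 1 then PySem.List.max? ints (fun x => x) else none)

-- ===== PRECONDITION & SPEC =====
-- Pre_ excludes exactly the nonempty strings without an ASCII digit, on which A's min([]) raises ValueError.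
def Pre_get_ages_from_age (age : Option String) : Prop :=
  (age.map (fun s => s.toList.isEmpty || s.toList.any pvIsDig)).getD true = true
instance (age : Option String) : Decidable (Pre_get_ages_from_age age) := by unfold Pre_get_ages_from_age; infer_instance

def pvWitness_get_ages_from_age : Option String := some "18-25"

-- On nonempty strings containing no ASCII digit, A raises ValueError (min of an empty list); B returns (None, None).
def Raises_get_ages_from_age (age : Option String) : Prop :=
  (age.map (fun s => !s.toList.isEmpty && !s.toList.any pvIsDig)).getD false = true
instance (age : Option String) : Decidable (Raises_get_ages_from_age age) := by unfold Raises_get_ages_from_age; infer_instance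

def pvRaiseWitness_get_ages_from_age : Option String := some "adult"
def pvRaiseWitnessOut_get_ages_from_age : Option Int × Option Int := (none, none)

def Spec_get_ages_from_age (age : Option String) (out : Option Int × Option Int) : Prop := out = get_ages_from_age_alt age
instance (age : Option String) (out : Option Int × Option Int) : Decidable (Spec_get_ages_from_age age out) := by unfold Spec_get_ages_from_age; infer_instance

-- ===== CLAIM (what is proved, stated in full; the proofs are below) =====
def Claim_equal_get_ages_from_age : Prop := ∀ (age : Option String), Dom_get_ages_from_age age → Pre_get_ages_from_age age → Spec_get_ages_from_age age (get_ages_from_age age)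
def Claim_raises_get_ages_from_age : Prop := (∀ (age : Option String), Dom_get_ages_from_age age → Raises_get_ages_from_age age → ¬ Pre_get_ages_from_age age) ∧ (Dom_get_ages_from_age (pvRaiseWitness_get_ages_from_age) ∧ Raises_get_ages_from_age (pvRaiseWitness_get_ages_from_age) ∧ get_ages_from_age_alt (pvRaiseWitness_get_ages_from_age) = pvRaiseWitnessOut_get_ages_from_age)

-- ===== LEMMAS AND PROOFS =====

-- token-level version of A's outer loop (proof helper)
def pvRuns : List Char → List (List Char)
  | [] => []
  | c :: cs =>
    if (pvAInner (c :: cs)).1 = [] then pvRuns ((pvAInner (c :: cs)).2.drop 1)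
    else (pvAInner (c :: cs)).1 :: pvRuns ((pvAInner (c :: cs)).2.drop 1)
  termination_by cs => cs.length
  decreasing_by all_goals exact pvAInner_rest_lt c cs

def pvClean (cs : List Char) : List Char := cs.map (fun c => if pvIsDig c then c else ' ')

lemma pvIsDig_not_isspace {c : Char} (h : pvIsDig c = true) : PySem.Chars.isspace c = false := by
  simp only [pvIsDig, Bool.and_eq_true, decide_eq_true_eq] at h
  obtain ⟨h1, h2⟩ := h
  have h1' : (48 : Nat) ≤ c.toNat := by
    have := UInt32.le_iff_toNat_le.mp (Char.le_def.mp h1)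
    show 48 ≤ c.val.toNat
    have e : ('0' : Char).val.toNat = 48 := rfl
    omega
  have h2' : c.toNat ≤ 57 := by
    have := UInt32.le_iff_toNat_le.mp (Char.le_def.mp h2)
    show c.val.toNat ≤ 57
    have e : ('9' : Char).val.toNat = 57 := rfl
    omega
  unfold PySem.Chars.isspace
  simp only [Bool.or_eq_false_iff, Bool.and_eq_false_iff, decide_eq_false_iff_not]
  omega

lemma pvAInner_of_dig {c : Char} (cs : List Char) (hd : pvIsDig c = true) :
    pvAInner (c :: cs) = (c :: (pvAInner cs).1, (pvAInner cs).2) := by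
  simp [pvAInner, hd]

lemma pvAInner_of_not_dig {c : Char} (cs : List Char) (hd : pvIsDig c = false) :
    pvAInner (c :: cs) = ([], c :: cs) := by
  simp [pvAInner, hd]

lemma pvNot_dig_of_inner_nil {c : Char} {cs : List Char} (hnil : (pvAInner (c :: cs)).1 = []) :
    pvIsDig c = false := by
  by_contra hc
  simp only [Bool.not_eq_false] at hc
  rw [pvAInner_of_dig cs hc] at hnil
  exact List.cons_ne_nil _ _ hnil

lemma pvDig_of_inner_ne_nil {c : Char} {cs : List Char} (hnil : ¬ (pvAInner (c :: cs)).1 = []) :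
    pvIsDig c = true := by
  by_contra hc
  simp only [Bool.not_eq_true] at hc
  rw [pvAInner_of_not_dig cs hc] at hnil
  exact hnil rfl

lemma pvAOuter_eq_runs (cs : List Char) :
    pvAOuter cs = (pvRuns cs).map (fun t => (PySem.Int.ofChars? t).getD 0) := by
  induction cs using pvAOuter.induct with
  | case1 => simp [pvAOuter, pvRuns]
  | case2 c cs hnil ih => rw [pvAOuter, pvRuns]; simp only [hnil, if_pos]; exact ih
  | case3 c cs hnil ih =>
    rw [pvAOuter, pvRuns, if_neg hnil, if_neg hnil, List.map_cons, ih]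

lemma pvAOuter_nil_all (cs : List Char) (h : pvAOuter cs = []) : cs.any pvIsDig = false := by
  induction cs using pvAOuter.induct with
  | case1 => simp
  | case2 c cs hnil ih =>
    have hd : pvIsDig c = false := pvNot_dig_of_inner_nil hnil
    rw [pvAOuter, if_pos hnil] at h
    have hrest : (pvAInner (c :: cs)).2.drop 1 = cs := by
      simp [pvAInner_of_not_dig cs hd]
    rw [hrest] at h ih
    simp [hd, ih h]
  | case3 c cs hnil ih =>
    rw [pvAOuter, if_neg hnil] at h
    exact absurd h (List.cons_ne_nil _ _)

lemma pvClean_cons (c : Char) (cs : List Char) :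
    pvClean (c :: cs) = (if pvIsDig c then c else ' ') :: pvClean cs := by
  simp [pvClean]

-- split₀.go on the cleaned string while a (reversed, nonempty) digit run `cur` is open
lemma pvGo_open (cs : List Char) : ∀ (cur : List Char) (acc : List (List Char)), cur ≠ [] →
    PySem.Chars.split₀.go (pvClean cs) cur acc =
      PySem.Chars.split₀.go (pvClean ((pvAInner cs).2.drop 1)) []
        ((cur.reverse ++ (pvAInner cs).1) :: acc) := by
  induction cs with
  | nil =>
    intro cur acc h
    simp [pvClean, pvAInner, PySem.Chars.split₀.go, h]
  | cons c cs ih =>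
    intro cur acc h
    by_cases hd : pvIsDig c = true
    · have hs := pvIsDig_not_isspace hd
      rw [pvClean_cons, if_pos hd, pvAInner_of_dig cs hd]
      rw [PySem.Chars.split₀.go]
      simp only [hs, Bool.false_eq_true, ite_false]
      rw [ih (c :: cur) acc (List.cons_ne_nil _ _)]
      simp [List.append_assoc]
    · have hd' : pvIsDig c = false := by simpa using hd
      have hsp : PySem.Chars.isspace ' ' = true := by decide
      rw [pvClean_cons, if_neg (by simp [hd']), pvAInner_of_not_dig cs hd']
      rw [PySem.Chars.split₀.go]
      simp [hsp, h]

lemma pvGo_closed (cs : List Char) : ∀ (acc : List (List Char)),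
    PySem.Chars.split₀.go (pvClean cs) [] acc = acc.reverse ++ pvRuns cs := by
  induction cs using pvRuns.induct with
  | case1 => intro acc; simp [pvClean, pvRuns, PySem.Chars.split₀.go]
  | case2 c cs hnil ih =>
    intro acc
    have hd : pvIsDig c = false := pvNot_dig_of_inner_nil hnil
    have hsp : PySem.Chars.isspace ' ' = true := by decide
    have hrest : (pvAInner (c :: cs)).2.drop 1 = cs := by
      simp [pvAInner_of_not_dig cs hd]
    rw [pvRuns, if_pos hnil, hrest]
    rw [pvClean_cons, if_neg (by simp [hd])]
    rw [PySem.Chars.split₀.go]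
    simp only [hsp, if_pos, List.isEmpty_nil]
    rw [hrest] at ih
    exact ih acc
  | case3 c cs hnil ih =>
    intro acc
    have hd : pvIsDig c = true := pvDig_of_inner_ne_nil hnil
    have hs := pvIsDig_not_isspace hd
    rw [pvRuns, if_neg hnil, pvAInner_of_dig cs hd]
    rw [pvClean_cons, if_pos hd]
    rw [PySem.Chars.split₀.go]
    simp only [hs, Bool.false_eq_true, ite_false]
    rw [pvGo_open cs [c] acc (List.cons_ne_nil _ _)]
    have hrest : (pvAInner (c :: cs)).2 = (pvAInner cs).2 := by
      rw [pvAInner_of_dig cs hd]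
    rw [hrest] at ih
    rw [ih]
    simp

lemma pvSplit_clean (cs : List Char) : PySem.Chars.split₀ (pvClean cs) = pvRuns cs := by
  unfold PySem.Chars.split₀
  simpa using pvGo_closed cs []

-- ===== VERDICT (by name: the statement is the Claim_ definition above) =====
theorem get_ages_from_age_spec : Claim_equal_get_ages_from_age := by
  intro age _hdom hpre
  unfold Spec_get_ages_from_age
  match age with
  | none => rfl
  | some s =>
    simp only [get_ages_from_age, get_ages_from_age_alt]
    by_cases he : s.toList.isEmpty
    · simp [he]
    · simp only [he, Bool.false_eq_true, ite_false]
      have hints : ((PySem.Chars.split₀ (s.toList.map (fun c => if pvIsDig c then c else ' '))).map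
          (fun t => (PySem.Int.ofChars? t).getD 0)) = pvAOuter s.toList := by
        rw [show (s.toList.map (fun c => if pvIsDig c then c else ' ')) = pvClean s.toList from rfl,
          pvSplit_clean, pvAOuter_eq_runs]
      rw [hints]
      have hne : pvAOuter s.toList ≠ [] := by
        intro h0
        have hall := pvAOuter_nil_all s.toList h0
        unfold Pre_get_ages_from_age at hpre
        simp only [Option.map_some, Option.getD_some, Bool.or_eq_true] at hpre
        rcases hpre with h | h
        · exact he (by simpa using h)
        · rw [hall] at h; exact Bool.false_ne_true h
      rw [if_neg hne]

@[simp] theorem get_ages_from_age_raises : Claim_raises_get_ages_from_age := by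
  unfold Claim_raises_get_ages_from_age
  constructor
  · intro age _ hr hp
    unfold Raises_get_ages_from_age at hr
    unfold Pre_get_ages_from_age at hp
    match age with
    | none => simp at hr
    | some s =>
      simp only [Option.map_some, Option.getD_some, Bool.and_eq_true, Bool.not_eq_true',
        Bool.or_eq_true] at hr hp
      rcases hp with h | h
      · rw [hr.1] at h; exact Bool.false_ne_true h
      · rw [hr.2] at h; exact Bool.false_ne_true h
  · exact ⟨by decide, by decide, by decide⟩
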